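-- pv_equiv track=rewrite | github.com/srd4/tomatotimer | stringmanagement.py | toWords
-- ===== SOURCE A (Python) =====
-- import string
--
-- def punc_off(s):
--     """take punctuation chars out of a string
-- takes : string
-- returns : sting"""
--     for i in string.punctuation:
--         s = s.replace(i,"")
--     return s
--
-- def white_off(s):
--     """takes whitespace out
-- takes: string
-- returns: string"""
--     white = ["\t","\n","\r","\x0b","\x0c","\ufeff"]
--     for i in white:
--         s = s.replace(i,"")
--     return s
--
-- def toWords(linelist):
--     """transforms list of lines in lower-whitespace and punctuation free words
-- list -> list"""
--     t = []
--
--     for i in linelist: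
--         wordlist = i.split(" ")
--         for word in wordlist:
--             word = punc_off(white_off(word.lower()))
--             if len(word) > 0:
--                 t.append(word)
--     return t
-- ===== SOURCE B (Python) =====
-- import string
--
-- FORBIDDEN = frozenset(string.punctuation) | {"\t", "\n", "\r", "\x0b", "\x0c", "\ufeff"}
--
--
-- def toWords(linelist):
--     """transforms list of lines in lower-whitespace and punctuation free words
-- list -> list"""
--     return [w
--             for line in linelist
--             for w in ("".join(c for c in tok.lower() if c not in FORBIDDEN)
--                       for tok in line.split(" "))
--             if w]
-- ===== Notes on version B (the rewrite author's own statement) =====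
-- stated objective: idiomatic
-- what changed: Replaces A's 38 full-string replace() rescans per word (one per forbidden character, through two helper functions) with a single character-wise filter pass per word against one precomputed frozenset, expressed as a flat comprehension.
import Mathlib
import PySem

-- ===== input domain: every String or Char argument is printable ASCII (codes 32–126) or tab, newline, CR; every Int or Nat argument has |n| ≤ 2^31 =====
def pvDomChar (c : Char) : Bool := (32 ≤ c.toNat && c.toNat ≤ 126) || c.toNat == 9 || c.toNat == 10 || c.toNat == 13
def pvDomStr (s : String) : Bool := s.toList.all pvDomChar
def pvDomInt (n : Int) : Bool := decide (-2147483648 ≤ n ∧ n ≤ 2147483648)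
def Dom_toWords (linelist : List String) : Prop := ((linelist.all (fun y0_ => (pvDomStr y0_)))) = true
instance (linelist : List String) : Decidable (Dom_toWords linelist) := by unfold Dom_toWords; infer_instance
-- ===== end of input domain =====

-- B replaces A's per-character replace() rescans with one precomputed forbidden set
-- and a single filter pass per token (idiomatic comprehension form).

-- ===== PORT A =====
-- string.punctuation
def pvPunct : String := "!\"#$%&'()*+,-./:;<=>?@[\\]^_`{|}~"

-- for i in string.punctuation: s = s.replace(i, "")
def punc_off (s : String) : String :=
  pvPunct.toList.foldl (fun t c => PySem.Str.replace t (String.ofList [c]) "") s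

-- white = [...]; for i in white: s = s.replace(i, "")
def white_off (s : String) : String :=
  (["\t", "\n", "\r", "\x0b", "\x0c", "\ufeff"] : List String).foldl
    (fun t w => PySem.Str.replace t w "") s

def toWords (linelist : List String) : List String :=
  linelist.foldl (fun t i =>
    let wordlist := (PySem.Str.split? i " ").getD []
    wordlist.foldl (fun t word =>
      let word := punc_off (white_off (PySem.Str.lower word))
      if PySem.Str.len word > 0 then t ++ [word] else t) t) []

-- ===== PORT B =====
-- FORBIDDEN = frozenset(string.punctuation) | {"\t","\n","\r","\x0b","\x0c","\ufeff"}
def pvForbidden : PySem.Set Char :=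
  PySem.Set.union (PySem.Set.ofList pvPunct.toList)
    (PySem.Set.ofList ['\t', '\n', '\r', '\x0b', '\x0c', '\ufeff'])

-- "".join(c for c in tok.lower() if c not in FORBIDDEN)
def pvClean (tok : String) : String :=
  String.ofList ((PySem.Str.lower tok).toList.filter
    (fun c => PySem.Set.contains pvForbidden c = false))

-- [w for line in linelist for w in (clean(tok) for tok in line.split(" ")) if w]
def toWords_alt (linelist : List String) : List String :=
  linelist.flatMap (fun line =>
    (((PySem.Str.split? line " ").getD []).map pvClean).filter (fun w => w ≠ ""))

-- ===== PRECONDITION & SPEC =====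
def Spec_toWords (linelist : List String) (out : List String) : Prop := out = toWords_alt linelist
instance (linelist : List String) (out : List String) : Decidable (Spec_toWords linelist out) := by unfold Spec_toWords; infer_instance

-- ===== CLAIM (what is proved, stated in full; the proofs are below) =====
def Claim_equal_toWords : Prop := ∀ (linelist : List String), Dom_toWords linelist → Spec_toWords linelist (toWords linelist)

-- ===== LEMMAS AND PROOFS =====

-- replacing a single character by "" is filtering it out
theorem replace_single_go (c : Char) (fuel : Nat) (l acc : List Char) (h : l.length ≤ fuel) :
    PySem.Chars.replace.go [c] [] fuel l acc = acc.reverse ++ l.filter (fun x => x ≠ c) := by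
  induction fuel generalizing l acc with
  | zero =>
    interval_cases hl : l.length
    · simp_all [List.length_eq_zero_iff.mp hl, PySem.Chars.replace.go]
  | succ n ih =>
    cases l with
    | nil => simp [PySem.Chars.replace.go]
    | cons a t =>
      simp only [PySem.Chars.replace.go, List.isPrefixOf, Bool.and_true]
      by_cases hac : a = c
      · subst hac
        simp only [BEq.rfl, if_true, List.length_cons, List.length_nil, List.drop_succ_cons,
          List.drop_zero, List.reverse_nil, List.nil_append]
        rw [ih t acc (by simpa using Nat.le_of_succ_le_succ h)]
        simp
      · have hba : (c == a) = false := by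
          simp only [beq_eq_false_iff_ne, ne_eq]
          exact fun h' => hac h'.symm
        simp only [hba, Bool.false_eq_true, if_false]
        rw [ih t (a :: acc) (by simpa using Nat.le_of_succ_le_succ h)]
        simp [hac]

theorem replace_single (c : Char) (cs : List Char) :
    PySem.Chars.replace cs [c] [] = cs.filter (fun x => x ≠ c) := by
  simp [PySem.Chars.replace, replace_single_go c cs.length cs [] le_rfl]

-- a chain of single-char removals is one filter against membership in the char list
theorem repl_chain (cs s : List Char) :
    cs.foldl (fun t c => PySem.Chars.replace t [c] []) s
      = s.filter (fun x => ¬ x ∈ cs) := by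
  induction cs generalizing s with
  | nil => simp
  | cons c cs ih =>
    rw [List.foldl_cons, replace_single, ih, List.filter_filter]
    apply List.filter_congr
    intro x _
    by_cases hx : x = c <;> simp [hx]

theorem foldl_str_chars (cs : List Char) (s : String) :
    (cs.foldl (fun t c => PySem.Str.replace t (String.ofList [c]) "") s).toList
      = cs.foldl (fun t c => PySem.Chars.replace t [c] []) s.toList := by
  induction cs generalizing s with
  | nil => rfl
  | cons c cs ih =>
    simp only [List.foldl_cons, ih, PySem.Str.toList_replace, String.toList_ofList]
    rfl

theorem punc_off_toList (s : String) :
    (punc_off s).toList = s.toList.filter (fun x => ¬ x ∈ pvPunct.toList) := by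
  rw [punc_off, foldl_str_chars, repl_chain]

theorem white_off_toList (s : String) :
    (white_off s).toList
      = s.toList.filter (fun x => ¬ x ∈ (['\t', '\n', '\r', '\x0b', '\x0c', '\ufeff'] : List Char)) := by
  have : white_off s
      = (['\t', '\n', '\r', '\x0b', '\x0c', '\ufeff'] : List Char).foldl
          (fun t c => PySem.Str.replace t (String.ofList [c]) "") s := by
    simp only [white_off, List.foldl_cons, List.foldl_nil]
  rw [this, foldl_str_chars, repl_chain]

theorem clean_eq (w : String) :
    punc_off (white_off (PySem.Str.lower w)) = pvClean w := by
  rw [← String.toList_inj, punc_off_toList, white_off_toList, List.filter_filter, pvClean,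
    String.toList_ofList]
  apply List.filter_congr
  intro x _
  have hmem : PySem.Set.contains pvForbidden x
      = (x ∈ pvPunct.toList ∨ x ∈ (['\t', '\n', '\r', '\x0b', '\x0c', '\ufeff'] : List Char) : Bool) := by
    simp only [PySem.Set.contains, List.contains_eq_mem, pvForbidden]
    simp [PySem.Set.mem_union, PySem.Set.mem_ofList]
  simp only [hmem]
  by_cases h1 : x ∈ pvPunct.toList <;> by_cases h2 : x ∈ (['\t', '\n', '\r', '\x0b', '\x0c', '\ufeff'] : List Char) <;>
    simp [h1, h2]

theorem len_pos_iff (w : String) : (PySem.Str.len w > 0) ↔ w ≠ "" := by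
  constructor
  · intro h he; subst he; simp [PySem.Str.len] at h
  · intro h
    have hne : w.toList ≠ [] := fun he => h (by rw [← String.toList_inj, he]; rfl)
    have := List.length_pos_iff.mpr hne
    simp only [PySem.Str.len, gt_iff_lt]
    exact_mod_cast this

theorem inner_eq (t ws : List String) :
    ws.foldl (fun t word =>
      let word := punc_off (white_off (PySem.Str.lower word))
      if PySem.Str.len word > 0 then t ++ [word] else t) t
      = t ++ (ws.map pvClean).filter (fun w => w ≠ "") := by
  induction ws generalizing t with
  | nil =>
    simp only [List.foldl_nil, List.map_nil, List.filter_nil, List.append_nil]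
  | cons w ws ih =>
    rw [List.foldl_cons, ih]
    simp only [clean_eq, List.map_cons, List.filter_cons]
    by_cases h : pvClean w = ""
    · rw [if_neg (fun hp => ((len_pos_iff _).mp hp) h)]
      simp only [h, ne_eq, not_true_eq_false, decide_false, Bool.false_eq_true, if_false]
    · rw [if_pos ((len_pos_iff _).mpr h)]
      simp only [ne_eq, h, not_false_eq_true, decide_true, if_true, List.append_assoc,
        List.singleton_append]

-- ===== VERDICT (by name: the statement is the Claim_ definition above) =====
theorem toWords_spec : Claim_equal_toWords := by
  intro linelist _
  unfold Spec_toWords toWords toWords_alt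
  have h1 : ∀ (t : List String), ∀ i ∈ linelist,
      (fun (t : List String) (i : String) =>
        let wordlist := (PySem.Str.split? i " ").getD []
        wordlist.foldl (fun t word =>
          let word := punc_off (white_off (PySem.Str.lower word))
          if PySem.Str.len word > 0 then t ++ [word] else t) t) t i
      = (fun (t : List String) (i : String) =>
        t ++ (((PySem.Str.split? i " ").getD []).map pvClean).filter (fun w => w ≠ "")) t i := by
    intro t i _
    exact inner_eq t _
  rw [PySem.List.foldl_congr_mem _ _ _ _ h1, PySem.List.foldl_append_eq_flatMap]
  simp
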